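-- pv_equiv track=rewrite | github.com/axelthorstein/object | utils/list_utils.py | groupby_with_delimiter
-- ===== SOURCE A (Python) =====
-- from collections import Counter
--
-- def most_common_element(elements):
--     """Return the most common element for a list.
--
--     If there are two or more that have the same amount of occurences, then take
--     the first occuring element. If the list is empty, just return the list.
--
--     Args:
--         elements (List[str]): The list of elements.
--
--     Returns:
--         str: The most common element.
--
--     Example:
--         >>> most_common_element(['1', '2', '2', '3'])
--         ['2']
--         >>> most_common_element([])
--         []
--     """
--     most_common = Counter(elements).most_common(1)
--
--     if most_common:
--         return [most_common[0][0]]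
--
--     return most_common
--
-- def groupby_with_delimiter(elements, delimiter):
--     """Groupby the elements separated by the delimiter.
--
--     Group each slice of elements that are segmented by the delimiter. For each
--     group of elements, including the delimiter groups, group them by the most
--     common element.
--
--     Todo:
--         Find the max value over the group of delimiters.
--
--     Args:
--         elements (List[str]): The list of elements.
--         delimiter (str): The element to separate groups.
--
--     Returns:
--         str: The list of grouped elements.
--
--     Example:
--         >>> groupby_with_delimiter(['1', '2', '2', '1', '4', '1'], '1')
--         ['2', '4']
--         >>> groupby_with_delimiter(['1', '2', '2', '3', '1', '4'], '1')
--         ['2', '4']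
--     """
--     grouped_list = []
--     start_index = 0
--
--     for end_index, elemment in enumerate(elements):
--         if elemment == delimiter or end_index == len(elements) - 1:
--             segment = list(
--                 filter(lambda x: x != delimiter,
--                        elements[start_index:end_index + 1]))
--             elemment = most_common_element(segment)
--             grouped_list += elemment
--             start_index = end_index
--
--     return grouped_list
-- ===== SOURCE B (Python) =====
-- from collections import Counter
--
-- def most_common_element(elements):
--     most_common = Counter(elements).most_common(1)
--     if most_common:
--         return [most_common[0][0]]
--     return most_common
--
-- def groupby_with_delimiter(elements, delimiter):
--     """Split into segments at each delimiter (keeping empty segments and the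
--     final one), then concatenate the most common element of each segment."""
--     segments = []
--     current = []
--     for element in elements:
--         if element == delimiter:
--             segments.append(current)
--             current = []
--         else:
--             current.append(element)
--     segments.append(current)
--     result = []
--     for segment in segments:
--         result += most_common_element(segment)
--     return result
-- ===== Notes on version B (the rewrite author's own statement) =====
-- stated objective: simpler
-- what changed: B replaces A's index-threaded pass (tracking start_index/end_index, re-slicing the full list with an overlapping start and re-filtering the delimiter out of every slice) by a plain split-then-map decomposition: one loop splits the list into delimiter-free segments (keeping empty ones and always flushing the final segment), then most_common_element is mapped over the segments and concatenated; dropping the slice+filter per flush also makes B measurably faster by a constant factor.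
import Mathlib
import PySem

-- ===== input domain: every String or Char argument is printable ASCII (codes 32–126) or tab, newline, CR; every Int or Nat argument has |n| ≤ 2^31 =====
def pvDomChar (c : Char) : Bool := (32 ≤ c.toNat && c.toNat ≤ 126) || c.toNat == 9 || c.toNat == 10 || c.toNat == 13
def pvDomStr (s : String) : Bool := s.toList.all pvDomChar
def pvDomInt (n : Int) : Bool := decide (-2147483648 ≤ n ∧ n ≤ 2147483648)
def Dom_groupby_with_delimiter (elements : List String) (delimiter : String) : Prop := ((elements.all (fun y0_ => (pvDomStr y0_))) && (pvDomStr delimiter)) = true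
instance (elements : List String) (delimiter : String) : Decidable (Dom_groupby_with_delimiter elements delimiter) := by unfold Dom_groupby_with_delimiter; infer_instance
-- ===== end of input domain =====

-- B replaces A's index-threaded slicing loop with a split-into-segments-then-map decomposition (simpler); same return value on every input.


-- ===== PORT A =====
-- shared helper (both Pythons define it verbatim): Counter(xs).most_common(1) is the
-- first-inserted key of maximal count (Counter sorts by count descending, stably)
def most_common_element (elements : List String) : List String :=
  match (PySem.Dict.counter elements).items with
  | [] => []
  | p :: ps => [(ps.foldl (fun best q => if q.2 > best.2 then q else best) p).1]

def groupby_with_delimiter (elements : List String) (delimiter : String) : List String :=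
  let st := (PySem.List.enumerate elements 0).foldl
    (fun (st : List String × Int) (p : Int × String) =>
      if p.2 == delimiter || p.1 == (elements.length : Int) - 1 then
        let segment := (PySem.List.slice elements (some st.2) (some (p.1 + 1))).filter
          (fun x => x != delimiter)
        (st.1 ++ most_common_element segment, p.1)
      else st)
    ([], 0)
  st.1

-- ===== PORT B =====
def groupby_with_delimiter_alt (elements : List String) (delimiter : String) : List String :=
  let st := elements.foldl
    (fun (st : List (List String) × List String) element =>
      if element == delimiter then (st.1 ++ [st.2], []) else (st.1, st.2 ++ [element]))
    ([], [])
  let segments := st.1 ++ [st.2]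
  segments.foldl (fun result segment => result ++ most_common_element segment) []

-- ===== PRECONDITION & SPEC =====
def Spec_groupby_with_delimiter (elements : List String) (delimiter : String) (out : List String) : Prop := out = groupby_with_delimiter_alt elements delimiter
instance (elements : List String) (delimiter : String) (out : List String) : Decidable (Spec_groupby_with_delimiter elements delimiter out) := by unfold Spec_groupby_with_delimiter; infer_instance

-- ===== CLAIM (what is proved, stated in full; the proofs are below) =====
def Claim_equal_groupby_with_delimiter : Prop := ∀ (elements : List String) (delimiter : String), Dom_groupby_with_delimiter elements delimiter → Spec_groupby_with_delimiter elements delimiter (groupby_with_delimiter elements delimiter)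

-- ===== LEMMAS AND PROOFS =====

-- common reference: the delimiter-free segments still to be produced, given the
-- currently accumulated segment `cur` and the remaining input
def segsRec (d : String) : List String → List String → List (List String)
  | cur, [] => [cur]
  | cur, x :: xs => if x = d then cur :: segsRec d [] xs else segsRec d (cur ++ [x]) xs

theorem mce_nil : most_common_element [] = [] := rfl

-- B's split loop produces exactly segsRec
theorem b_split (d : String) (xs : List String) : ∀ (segs : List (List String)) (cur : List String),
    (xs.foldl
      (fun (st : List (List String) × List String) x =>
        if x == d then (st.1 ++ [st.2], []) else (st.1, st.2 ++ [x])) (segs, cur)).1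
      ++ [(xs.foldl
      (fun (st : List (List String) × List String) x =>
        if x == d then (st.1 ++ [st.2], []) else (st.1, st.2 ++ [x])) (segs, cur)).2]
    = segs ++ segsRec d cur xs := by
  induction xs with
  | nil => intro segs cur; simp [segsRec]
  | cons x xs ih =>
    intro segs cur
    simp only [List.foldl_cons]
    by_cases hx : x = d
    · subst hx
      simp only [BEq.rfl, if_true]
      rw [ih]
      simp [segsRec]
    · have hxb : (x == d) = false := by simp [hx]
      simp only [hxb, Bool.false_eq_true, if_false]
      rw [ih]
      simp [segsRec, hx]

theorem b_eq (elements : List String) (d : String) :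
    groupby_with_delimiter_alt elements d
      = (segsRec d [] elements).flatMap most_common_element := by
  show ((_ : List (List String) × List String).1 ++ [_]).foldl _ [] = _
  rw [PySem.List.foldl_append_eq_flatMap, b_split]
  simp

-- invariant of A's enumerate loop: with `s ≤ k` the previous flush point and the
-- elements between s and k (minus delimiters) the pending segment, the rest of the
-- loop appends exactly the most-common elements of the remaining segments
theorem a_inv (elements : List String) (d : String) :
    ∀ (suffix : List String) (k s : Nat) (acc : List String),
    elements.drop k = suffix → suffix ≠ [] → s ≤ k →
    ((PySem.List.enumerate suffix (k : Int)).foldl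
      (fun (st : List String × Int) (p : Int × String) =>
        if p.2 == d || p.1 == (elements.length : Int) - 1 then
          (st.1 ++ most_common_element
            ((PySem.List.slice elements (some st.2) (some (p.1 + 1))).filter
              (fun x => x != d)), p.1)
        else st)
      (acc, (s : Int))).1
    = acc ++ (segsRec d (((elements.drop s).take (k - s)).filter (fun x => x != d)) suffix).flatMap
        most_common_element := by
  intro suffix
  induction suffix with
  | nil => intro k s acc _ hne _; exact absurd rfl hne
  | cons x rest ih =>
    intro k s acc hdrop hne hsk
    have hk : k < elements.length := by
      by_contra h
      rw [List.drop_eq_nil_of_le (by omega)] at hdrop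
      exact List.cons_ne_nil x rest hdrop.symm
    have hxk : elements[k]? = some x := by
      have h0 : (elements.drop k)[0]? = some x := by rw [hdrop]; rfl
      rwa [List.getElem?_drop, Nat.add_zero] at h0
    have hrest : elements.drop (k + 1) = rest := by
      have h1 := congrArg List.tail hdrop
      rwa [List.tail_drop] at h1
    have hlen : elements.length = k + rest.length + 1 := by
      have h2 := congrArg List.length hdrop
      rw [List.length_drop] at h2
      simp only [List.length_cons] at h2
      omega
    have htake : (elements.drop s).take (k + 1 - s) = (elements.drop s).take (k - s) ++ [x] := by
      rw [show k + 1 - s = (k - s) + 1 by omega, List.take_add_one, List.getElem?_drop,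
        Nat.add_sub_cancel' hsk, hxk]
      rfl
    -- the segment sliced out at a flush at index k
    have hseg : (PySem.List.slice elements (some (s : Int)) (some ((k : Int) + 1))).filter
        (fun z => z != d)
        = ((elements.drop s).take (k - s)).filter (fun z => z != d)
          ++ (if x = d then [] else [x]) := by
      rw [show ((k : Int) + 1) = ((k + 1 : Nat) : Int) by push_cast; ring,
        PySem.List.slice_natCast, htake, List.filter_append]
      by_cases hx : x = d <;> simp [hx]
    rw [PySem.List.enumerate_cons]
    simp only [List.foldl_cons]
    have hcast : ((k : Int) + 1) = ((k + 1 : Nat) : Int) := by push_cast; ring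
    cases rest with
    | nil =>
      -- last element of the list: the flush fires (either disjunct)
      have hlen0 : elements.length = k + 1 := by simpa using hlen
      have hcond : (((k : Int)) == (elements.length : Int) - 1) = true := by
        rw [beq_iff_eq]; omega
      simp only [hcond, Bool.or_true, if_true]
      rw [PySem.List.enumerate_nil, List.foldl_nil, hseg]
      by_cases hx : x = d <;> simp [hx, segsRec, mce_nil]
    | cons y rest' =>
      have hcond : (((k : Int)) == (elements.length : Int) - 1) = false := by
        rw [beq_eq_false_iff_ne]
        intro h
        simp only [List.length_cons] at hlen
        omega
      by_cases hx : x = d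
      · subst hx
        simp only [BEq.rfl, Bool.true_or, if_true]
        rw [hseg, if_pos rfl, List.append_nil, hcast,
          ih (k + 1) k _ hrest (by simp) (by omega)]
        simp [segsRec, show k + 1 - k = 1 from by omega, hdrop]
      · have hxb : (x == d) = false := by simp [hx]
        simp only [hxb, hcond, Bool.or_self, Bool.false_eq_true, if_false]
        rw [hcast, ih (k + 1) s acc hrest (by simp) (by omega), htake, List.filter_append]
        simp [segsRec, hx]

-- ===== VERDICT (by name: the statement is the Claim_ definition above) =====
theorem groupby_with_delimiter_spec : Claim_equal_groupby_with_delimiter := by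
  intro elements d _
  unfold Spec_groupby_with_delimiter
  rw [b_eq]
  cases elements with
  | nil => rfl
  | cons x xs =>
    have h := a_inv (x :: xs) d (x :: xs) 0 0 [] rfl (by simp) (le_refl 0)
    simpa [groupby_with_delimiter] using h
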